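-- pv_equiv track=rewrite | github.com/TheVibration/pythonprocedures | firstlettercount.py | first_letter_count
-- ===== SOURCE A (Python) =====
-- def first_letter_count(lst, letter):
--     counter = 0
--     for i in lst:
--         ln = 0
--         while ln <= len(i)-1:
--             if i[ln] == letter:
--                 counter = counter + 1
--                 ln = ln + 1
--             else:
--                 ln = ln + 1
--     return counter
-- ===== SOURCE B (Python) =====
-- def first_letter_count(lst, letter):
--     # A single character never equals a string of another length, so the count is 0.
--     if len(letter) != 1:
--         return 0
--     joined = "".join(lst)
--     return len(joined) - len(joined.replace(letter, ""))
-- ===== Notes on version B (the rewrite author's own statement) =====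
-- stated objective: alternative
-- what changed: B computes the count by length arithmetic: it concatenates the strings once and subtracts the length of the concatenation with all occurrences of the letter deleted (str.replace), instead of A's hand-written per-string index while-loop with a running counter; multi-character or empty 'letter' short-circuits to 0 since no single character can equal it.
import Mathlib
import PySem

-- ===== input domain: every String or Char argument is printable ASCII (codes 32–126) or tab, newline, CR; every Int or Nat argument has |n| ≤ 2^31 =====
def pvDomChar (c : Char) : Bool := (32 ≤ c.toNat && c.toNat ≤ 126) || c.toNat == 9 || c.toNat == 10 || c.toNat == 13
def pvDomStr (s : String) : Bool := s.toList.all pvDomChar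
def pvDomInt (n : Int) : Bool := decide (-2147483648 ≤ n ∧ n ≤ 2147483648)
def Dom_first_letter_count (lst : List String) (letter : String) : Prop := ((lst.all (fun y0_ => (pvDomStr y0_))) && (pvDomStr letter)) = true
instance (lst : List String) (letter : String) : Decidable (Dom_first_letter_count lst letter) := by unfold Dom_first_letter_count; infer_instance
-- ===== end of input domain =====

-- B replaces A's per-string index while-loop and running counter by length arithmetic:
-- join once, delete every occurrence with replace, subtract the lengths. Objective: alternative.

-- ===== PORT A =====
-- inner while loop: ln from 0 while ln <= len(i)-1, i[ln] is the 1-char string at index ln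
def first_letter_count (lst : List String) (letter : String) : Int :=
  lst.foldl
    (fun counter i =>
      (PySem.List.pyRange 0 (PySem.Str.len i) 1).foldl
        (fun c ln =>
          if String.ofList [PySem.List.pyGetD i.toList ln ' '] == letter then c + 1 else c)
        counter)
    0

-- ===== PORT B =====
-- if len(letter) != 1: return 0
-- joined = "".join(lst); return len(joined) - len(joined.replace(letter, ""))
def first_letter_count_alt (lst : List String) (letter : String) : Int :=
  if PySem.Str.len letter ≠ 1 then 0
  else
    let joined := PySem.Str.join "" lst
    PySem.Str.len joined - PySem.Str.len (PySem.Str.replace joined letter "")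

-- ===== PRECONDITION & SPEC =====
def Spec_first_letter_count (lst : List String) (letter : String) (out : Int) : Prop := out = first_letter_count_alt lst letter
instance (lst : List String) (letter : String) (out : Int) : Decidable (Spec_first_letter_count lst letter out) := by unfold Spec_first_letter_count; infer_instance

-- ===== CLAIM (what is proved, stated in full; the proofs are below) =====
def Claim_equal_first_letter_count : Prop := ∀ (lst : List String) (letter : String), Dom_first_letter_count lst letter → Spec_first_letter_count lst letter (first_letter_count lst letter)

-- ===== LEMMAS AND PROOFS =====

-- counting fold over a char list equals a countP
theorem char_fold_eq_count (letter : String) (l : List Char) (c : Int) :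
    l.foldl (fun acc ch => if String.ofList [ch] == letter then acc + 1 else acc) c
      = c + (l.countP (fun ch => String.ofList [ch] == letter) : Int) := by
  induction l generalizing c with
  | nil => simp
  | cons ch rest ih =>
    rw [List.foldl_cons, ih]
    rw [List.countP_cons]
    by_cases hc : String.ofList [ch] == letter
    · simp [hc]; ring
    · simp [hc]

-- A's inner index loop is the char fold over i's characters
theorem inner_loop_eq_count (i : String) (letter : String) (c : Int) :
    (PySem.List.pyRange 0 (PySem.Str.len i) 1).foldl
        (fun c ln =>
          if String.ofList [PySem.List.pyGetD i.toList ln ' '] == letter then c + 1 else c)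
        c
      = c + (i.toList.countP (fun ch => String.ofList [ch] == letter) : Int) := by
  have h := PySem.List.foldl_pyRange_zero_pyGetD' i.toList (' ')
      (fun acc ch => if String.ofList [ch] == letter then acc + 1 else acc) c
  rw [PySem.Str.len_eq, h, char_fold_eq_count]

-- A's whole computation counts matching characters across the concatenation
theorem a_eq_countP (lst : List String) (letter : String) :
    first_letter_count lst letter
      = ((lst.flatMap String.toList).countP (fun ch => String.ofList [ch] == letter) : Int) := by
  unfold first_letter_count
  suffices h : ∀ c : Int,
      lst.foldl
        (fun counter i =>
          (PySem.List.pyRange 0 (PySem.Str.len i) 1).foldl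
            (fun c ln =>
              if String.ofList [PySem.List.pyGetD i.toList ln ' '] == letter then c + 1 else c)
            counter)
        c
        = c + ((lst.flatMap String.toList).countP (fun ch => String.ofList [ch] == letter) : Int) by
    simpa using h 0
  induction lst with
  | nil => simp
  | cons i rest ih =>
    intro c
    rw [List.foldl_cons, inner_loop_eq_count, ih]
    simp only [List.flatMap_cons, List.countP_append]
    push_cast
    ring

-- replace.go with a single-char pattern and empty replacement filters the character out
theorem replace_go_filter (a : Char) :
    ∀ (fuel : Nat) (l acc : List Char), l.length ≤ fuel →
      PySem.Chars.replace.go [a] [] fuel l acc = acc.reverse ++ l.filter (fun c => c != a) := by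
  intro fuel
  induction fuel with
  | zero =>
    intro l acc h
    have : l = [] := List.eq_nil_of_length_eq_zero (Nat.le_zero.mp h)
    subst this
    simp [PySem.Chars.replace.go]
  | succ n ih =>
    intro l acc h
    cases l with
    | nil => simp [PySem.Chars.replace.go]
    | cons c t =>
      rw [PySem.Chars.replace.go]
      by_cases hc : c = a
      · subst hc
        have hpre : List.isPrefixOf [c] (c :: t) = true := by
          simp [List.isPrefixOf]
        rw [if_pos hpre]
        simp only [List.length_cons] at h
        simp only [List.length_singleton, List.drop_one, List.tail_cons, List.reverse_nil,
          List.nil_append]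
        rw [ih t acc (by omega)]
        simp
      · have hpre : List.isPrefixOf [a] (c :: t) = false := by
          simp [List.isPrefixOf]
          exact fun hx => (hc hx.symm).elim
        rw [if_neg (by simp [hpre])]
        simp only [List.length_cons] at h
        rw [ih t (c :: acc) (by omega)]
        simp [hc]

-- replacing a single character by "" is a filter
theorem replace_single_eq_filter (cs : List Char) (a : Char) :
    PySem.Chars.replace cs [a] [] = cs.filter (fun c => c != a) := by
  unfold PySem.Chars.replace
  rw [if_neg (by simp)]
  simpa using replace_go_filter a cs.length cs [] le_rfl

-- joining with "" concatenates the character lists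
theorem join_empty_toList (lst : List String) :
    (PySem.Str.join "" lst).toList = lst.flatMap String.toList := by
  rw [PySem.Str.toList_join]
  show PySem.Chars.join [] (lst.map String.toList) = _
  unfold PySem.Chars.join
  rw [List.intercalate]
  induction lst with
  | nil => simp
  | cons s rest ih =>
    cases rest with
    | nil => simp
    | cons t r => simpa [List.intersperse, List.flatMap_cons] using ih

-- a 1-char string built by ofList equals letter iff the char is letter's unique char
theorem ofList_single_eq_iff (ch : Char) (letter : String) :
    (String.ofList [ch] == letter) = (letter.toList == [ch]) := by
  by_cases hx : letter.toList = [ch]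
  · have h2 : String.ofList [ch] = letter := by
      conv_rhs => rw [← String.ofList_toList (s := letter)]
      rw [hx]
    simp [h2, hx]
  · have h2 : String.ofList [ch] ≠ letter := by
      intro he
      apply hx
      rw [← he]
      simp
    simp [h2, hx]

-- the filtered list's length plus the count of the removed character is the original length
theorem filter_ne_length (a : Char) (cs : List Char) :
    (cs.filter (fun c => c != a)).length + cs.count a = cs.length := by
  induction cs with
  | nil => simp
  | cons c t ih =>
    rw [List.filter_cons, List.count_cons]
    by_cases h : c = a
    · subst h
      simp only [bne_self_eq_false, Bool.false_eq_true, if_false, beq_self_eq_true, if_true,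
        List.length_cons]
      omega
    · have h1 : (c != a) = true := by simp [h]
      have h2 : (c == a) = false := by simp [h]
      rw [h1, h2]
      simp only [if_true, Bool.false_eq_true, if_false, List.length_cons]
      omega

-- ===== VERDICT (by name: the statement is the Claim_ definition above) =====
theorem first_letter_count_spec : Claim_equal_first_letter_count := by
  intro lst letter _
  unfold Spec_first_letter_count first_letter_count_alt
  rw [a_eq_countP]
  by_cases hlen : PySem.Str.len letter = 1
  · rw [if_neg (by simpa using hlen)]
    show _ = PySem.Str.len (PySem.Str.join "" lst)
        - PySem.Str.len (PySem.Str.replace (PySem.Str.join "" lst) letter "")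
    rw [PySem.Str.len_eq] at hlen
    obtain ⟨a, ha⟩ : ∃ a, letter.toList = [a] := by
      cases hl : letter.toList with
      | nil => rw [hl] at hlen; simp at hlen
      | cons x t =>
        cases t with
        | nil => exact ⟨x, rfl⟩
        | cons y r => rw [hl] at hlen; simp at hlen; omega
    have hjoin := join_empty_toList lst
    rw [PySem.Str.len_eq, PySem.Str.len_eq, PySem.Str.toList_replace, hjoin, ha,
      show ("" : String).toList = ([] : List Char) from rfl, replace_single_eq_filter]
    have hcount : ∀ cs : List Char,
        cs.countP (fun ch => String.ofList [ch] == letter) = cs.count a := by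
      intro cs
      rw [List.count]
      apply List.countP_congr
      intro ch _
      rw [ofList_single_eq_iff, ha]
      by_cases h : ch = a
      · subst h
        simp
      · have h1 : (([a] : List Char) == [ch]) = false := by
          simp [Ne.symm h]
        have h2 : (ch == a) = false := by simp [h]
        rw [h1, h2]
    rw [hcount]
    have hfl := filter_ne_length a (lst.flatMap String.toList)
    omega
  · rw [if_pos (by simpa using hlen)]
    rw [PySem.Str.len_eq] at hlen
    have : (lst.flatMap String.toList).countP (fun ch => String.ofList [ch] == letter) = 0 := by
      apply List.countP_eq_zero.mpr
      intro ch _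
      rw [ofList_single_eq_iff]
      simp only [beq_iff_eq]
      intro hx
      apply hlen
      rw [hx]
      simp
    rw [this]
    simp
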